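-- pv_equiv track=rewrite | github.com/Aleksw3/AES-Highlevel-Model | Standard AES/AES_generic.py | msg_to_bin_packet
-- ===== SOURCE A (Python) =====
-- def msg_to_bin_packet(msg: str):
--     packets = []
--     tmp = []
--     for c in msg:
--         tmp.append(ord(c))
--         if len(tmp) == 128//8:
--             packets.append(tmp)
--             tmp = []
--     if len(tmp) > 0:
--         while len(tmp) < 128//8:
--             tmp = [0] + tmp
--         packets.append(tmp)
--     for packet in packets:
--         assert(len(packet) == 128//8)
--
--     return packets
-- ===== SOURCE B (Python) =====
-- def msg_to_bin_packet(msg: str):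
--     ords = [ord(c) for c in msg]
--     packets = []
--     for i in range(0, len(ords), 16):
--         g = ords[i:i + 16]
--         if len(g) == 16:
--             packets.append(g)
--         else:
--             packets.append([0] * (16 - len(g)) + g)
--     for packet in packets:
--         assert(len(packet) == 16)
--     return packets
-- ===== Notes on version B (the rewrite author's own statement) =====
-- stated objective: idiomatic
-- what changed: B precomputes the ordinal list once and forms packets by index-slicing in steps of 16 (padding only the final short slice), instead of A's char-by-char accumulate-and-flush loop with a [0]-prepending while loop.
import Mathlib
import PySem

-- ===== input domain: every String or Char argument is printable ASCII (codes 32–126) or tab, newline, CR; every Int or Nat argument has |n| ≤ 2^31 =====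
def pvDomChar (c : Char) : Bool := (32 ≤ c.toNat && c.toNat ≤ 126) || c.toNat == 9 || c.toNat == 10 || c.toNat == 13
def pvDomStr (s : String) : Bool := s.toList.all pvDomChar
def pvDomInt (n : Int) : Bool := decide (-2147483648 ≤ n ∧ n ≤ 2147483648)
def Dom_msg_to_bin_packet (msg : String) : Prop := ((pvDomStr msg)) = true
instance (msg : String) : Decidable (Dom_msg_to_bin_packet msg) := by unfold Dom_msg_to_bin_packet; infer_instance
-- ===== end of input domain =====

-- B forms packets by slicing a precomputed ordinal list in 16-steps instead of A's accumulate-and-flush loop; proved equal on all strings.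

-- ===== PORT A =====
-- while len(tmp) < 16: tmp = [0] + tmp
def padLoopA (tmp : List Int) : List Int :=
  if tmp.length < 16 then padLoopA (0 :: tmp) else tmp
termination_by 16 - tmp.length

-- the main for-loop of A, state = (packets, tmp)
def foldA : List Char → List (List Int) → List Int → List (List Int) × List Int
  | [], packets, tmp => (packets, tmp)
  | c :: cs, packets, tmp =>
    let tmp' := tmp ++ [(c.toNat : Int)]
    if tmp'.length = 16 then foldA cs (packets ++ [tmp']) []
    else foldA cs packets tmp'

-- trailing assert loop always passes; it returns nothing and is omitted
def msg_to_bin_packet (msg : String) : List (List Int) :=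
  let st := foldA msg.toList [] []
  if st.2.length > 0 then st.1 ++ [padLoopA st.2] else st.1

-- ===== PORT B =====
-- for i in range(0, len(ords), 16): g = ords[i:i+16]; … — as recursion on the remaining suffix
def chunksB (l : List Int) : List (List Int) :=
  if l.isEmpty then []
  else
    let g := l.take 16
    if g.length = 16 then g :: chunksB (l.drop 16)
    else [List.replicate (16 - g.length) 0 ++ g]
termination_by l.length
decreasing_by
  rename_i h _
  have : l.length ≠ 0 := by
    intro h0; exact absurd (List.eq_nil_of_length_eq_zero h0) (by simpa using h)
  simp [List.length_drop]; omega

def msg_to_bin_packet_alt (msg : String) : List (List Int) :=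
  chunksB (msg.toList.map fun c => (c.toNat : Int))

-- ===== PRECONDITION & SPEC =====
def Spec_msg_to_bin_packet (msg : String) (out : List (List Int)) : Prop := out = msg_to_bin_packet_alt msg
instance (msg : String) (out : List (List Int)) : Decidable (Spec_msg_to_bin_packet msg out) := by unfold Spec_msg_to_bin_packet; infer_instance

-- ===== CLAIM (what is proved, stated in full; the proofs are below) =====
def Claim_equal_msg_to_bin_packet : Prop := ∀ (msg : String), Dom_msg_to_bin_packet msg → Spec_msg_to_bin_packet msg (msg_to_bin_packet msg)

-- ===== LEMMAS AND PROOFS =====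

theorem padLoopA_eq (n : Nat) : ∀ (tmp : List Int), tmp.length + n = 16 →
    padLoopA tmp = List.replicate n 0 ++ tmp := by
  induction n with
  | zero => intro tmp h; rw [padLoopA]; simp; omega
  | succ n ih =>
    intro tmp h
    rw [padLoopA]
    have hlt : tmp.length < 16 := by omega
    rw [if_pos hlt, ih (0 :: tmp) (by simp; omega)]
    simp [List.replicate_succ']

theorem chunksB_nil : chunksB [] = [] := by unfold chunksB; simp

theorem chunksB_short (l : List Int) (h0 : l ≠ []) (h : l.length < 16) :
    chunksB l = [List.replicate (16 - l.length) 0 ++ l] := by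
  unfold chunksB
  have : l.take 16 = l := List.take_of_length_le (by omega)
  simp [h0, this]
  omega

theorem chunksB_cons16 (g l : List Int) (hg : g.length = 16) :
    chunksB (g ++ l) = g :: chunksB l := by
  conv_lhs => rw [chunksB.eq_def]
  have h1 : (g ++ l).take 16 = g := by
    rw [List.take_append_of_le_length (by omega)]
    exact List.take_of_length_le (by omega)
  have h2 : (g ++ l).drop 16 = l := by
    rw [List.drop_append_of_le_length (by omega)]
    simp [hg]
  have hne : (g ++ l) ≠ [] := by
    intro h; have := congrArg List.length h; simp [hg] at this
  simp [hne, h1, h2, hg]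

theorem foldA_main : ∀ (l : List Char) (packets : List (List Int)) (tmp : List Int),
    tmp.length < 16 →
    (let st := foldA l packets tmp;
     if st.2.length > 0 then st.1 ++ [padLoopA st.2] else st.1)
      = packets ++ chunksB (tmp ++ l.map fun c => (c.toNat : Int)) := by
  intro l
  induction l with
  | nil =>
    intro packets tmp h
    simp only [foldA, List.map_nil, List.append_nil]
    by_cases htmp : tmp = []
    · simp [htmp, chunksB_nil]
    · have hpos : tmp.length > 0 := List.length_pos_of_ne_nil htmp
      rw [chunksB_short tmp htmp h]
      simp [hpos, padLoopA_eq (16 - tmp.length) tmp (by omega)]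
  | cons c cs ih =>
    intro packets tmp h
    simp only [foldA]
    by_cases h16 : (tmp ++ [(c.toNat : Int)]).length = 16
    · rw [if_pos h16, ih (packets ++ [tmp ++ [(c.toNat : Int)]]) [] (by simp)]
      simp only [List.nil_append, List.map_cons]
      rw [show tmp ++ ((c.toNat : Int) :: cs.map fun c => (c.toNat : Int))
            = (tmp ++ [(c.toNat : Int)]) ++ cs.map (fun c => (c.toNat : Int)) by simp]
      rw [chunksB_cons16 _ _ h16]
      simp
    · rw [if_neg h16]
      have hlen : (tmp ++ [(c.toNat : Int)]).length < 16 := by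
        simp at h16 ⊢; omega
      rw [ih packets _ hlen]
      simp

-- ===== VERDICT (by name: the statement is the Claim_ definition above) =====
theorem msg_to_bin_packet_spec : Claim_equal_msg_to_bin_packet := by
  intro msg _
  unfold Spec_msg_to_bin_packet msg_to_bin_packet msg_to_bin_packet_alt
  simpa using foldA_main msg.toList [] [] (by simp)
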